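-- pv_equiv track=rewrite | github.com/541741106/IMPACT_HOI | tools/fill_gaps_from_source.py | gap_spans_for_entity
-- ===== SOURCE A (Python) =====
-- from dataclasses import dataclass
-- from typing import Any, DefaultDict, Dict, Iterable, List, Optional, Tuple
--
-- @dataclass
-- class Span:
--     start: int
--     end: int
--
-- def gap_spans_for_entity(
--     segments: List[Dict[str, Any]],
--     view_start: int,
--     view_end: int,
-- ) -> List[Span]:
--     if not segments:
--         return [Span(view_start, view_end)] if view_end >= view_start else []
--     gaps: List[Span] = []
--     first_s = int(segments[0]["start_frame"])
--     if first_s > view_start: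
--         gaps.append(Span(view_start, first_s - 1))
--     for i in range(1, len(segments)):
--         prev_e = int(segments[i - 1]["end_frame"])
--         cur_s = int(segments[i]["start_frame"])
--         if cur_s > prev_e + 1:
--             gaps.append(Span(prev_e + 1, cur_s - 1))
--     last_e = int(segments[-1]["end_frame"])
--     if last_e < view_end:
--         gaps.append(Span(last_e + 1, view_end))
--     return [g for g in gaps if g.end >= g.start]
-- ===== SOURCE B (Python) =====
-- from dataclasses import dataclass
-- from typing import Any, Dict, List
--
-- @dataclass
-- class Span:
--     start: int
--     end: int
--
-- def gap_spans_for_entity(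
--     segments: List[Dict[str, Any]],
--     view_start: int,
--     view_end: int,
-- ) -> List[Span]:
--     # single sweep with a running cursor; leading/middle/trailing gaps unified
--     gaps: List[Span] = []
--     cursor = view_start
--     for seg in segments:
--         s = int(seg["start_frame"])
--         e = int(seg["end_frame"])
--         if s > cursor:
--             gaps.append(Span(cursor, s - 1))
--         cursor = e + 1
--     if cursor <= view_end:
--         gaps.append(Span(cursor, view_end))
--     return gaps
-- ===== Notes on version B (the rewrite author's own statement) =====
-- stated objective: simpler
-- what changed: Replaces A's three separate gap cases (leading via segments[0], middle via an index loop over adjacent pairs, trailing via segments[-1]) plus a final filter pass with one sweep over the segments themselves keeping a running cursor, emitting each gap directly with no filter.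
import Mathlib
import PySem

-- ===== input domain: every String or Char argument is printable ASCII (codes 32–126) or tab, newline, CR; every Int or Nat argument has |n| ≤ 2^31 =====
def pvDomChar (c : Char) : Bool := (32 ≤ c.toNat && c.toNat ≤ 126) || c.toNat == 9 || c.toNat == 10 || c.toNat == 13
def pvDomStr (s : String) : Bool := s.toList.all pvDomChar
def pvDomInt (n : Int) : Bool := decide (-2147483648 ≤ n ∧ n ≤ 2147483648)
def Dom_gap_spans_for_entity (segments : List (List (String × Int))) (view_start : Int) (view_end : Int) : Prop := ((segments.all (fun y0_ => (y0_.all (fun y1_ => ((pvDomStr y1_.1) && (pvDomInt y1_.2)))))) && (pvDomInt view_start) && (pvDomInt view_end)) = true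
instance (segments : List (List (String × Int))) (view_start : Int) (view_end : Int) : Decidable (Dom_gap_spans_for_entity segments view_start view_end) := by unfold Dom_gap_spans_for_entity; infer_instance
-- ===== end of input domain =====

-- B replaces A's three-case gap construction (leading/middle/trailing + final filter)
-- with one sweep keeping a running cursor; same return value, proved equal under Pre_.


-- ===== PORT A =====
-- seg[k] as first-match association-list lookup (the dict convention); the getD 0
-- default is unreachable under Pre_, which requires both keys to be present.
def segGet (seg : List (String × Int)) (k : String) : Int := (seg.lookup k).getD 0

def gap_spans_for_entity (segments : List (List (String × Int))) (view_start : Int) (view_end : Int) : List (Int × Int) :=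
  if segments = [] then
    (if view_end ≥ view_start then [(view_start, view_end)] else [])
  else
    let first_s := segGet (PySem.List.pyGetD segments 0 []) "start_frame"
    let gaps1 := if first_s > view_start then [(view_start, first_s - 1)] else []
    let gaps2 := (PySem.List.pyRange 1 segments.length 1).foldl (fun gaps i =>
        let prev_e := segGet (PySem.List.pyGetD segments (i - 1) []) "end_frame"
        let cur_s := segGet (PySem.List.pyGetD segments i []) "start_frame"
        if cur_s > prev_e + 1 then gaps ++ [(prev_e + 1, cur_s - 1)] else gaps) gaps1
    let last_e := segGet (PySem.List.pyGetD segments (-1) []) "end_frame"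
    let gaps3 := if last_e < view_end then gaps2 ++ [(last_e + 1, view_end)] else gaps2
    gaps3.filter (fun g => g.2 ≥ g.1)

-- ===== PORT B =====
def gap_spans_for_entity_alt (segments : List (List (String × Int))) (view_start : Int) (view_end : Int) : List (Int × Int) :=
  let st := segments.foldl (fun (acc : List (Int × Int) × Int) seg =>
      let s := segGet seg "start_frame"
      let e := segGet seg "end_frame"
      ((if s > acc.2 then acc.1 ++ [(acc.2, s - 1)] else acc.1), e + 1)) ([], view_start)
  if st.2 ≤ view_end then st.1 ++ [(st.2, view_end)] else st.1

-- ===== PRECONDITION & SPEC =====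
-- Pre_ excludes exactly the inputs where the Python A raises KeyError: a segment
-- missing the "start_frame" or "end_frame" key.
def Pre_gap_spans_for_entity (segments : List (List (String × Int))) (view_start : Int) (view_end : Int) : Prop :=
  ∀ seg ∈ segments, (seg.lookup "start_frame").isSome ∧ (seg.lookup "end_frame").isSome
instance (segments : List (List (String × Int))) (view_start : Int) (view_end : Int) : Decidable (Pre_gap_spans_for_entity segments view_start view_end) := by unfold Pre_gap_spans_for_entity; infer_instance

def pvWitness_gap_spans_for_entity : (List (List (String × Int))) × Int × Int :=
  ([[("start_frame", 3), ("end_frame", 5)]], 0, 10)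

def Spec_gap_spans_for_entity (segments : List (List (String × Int))) (view_start : Int) (view_end : Int) (out : List (Int × Int)) : Prop := out = gap_spans_for_entity_alt segments view_start view_end
instance (segments : List (List (String × Int))) (view_start : Int) (view_end : Int) (out : List (Int × Int)) : Decidable (Spec_gap_spans_for_entity segments view_start view_end out) := by unfold Spec_gap_spans_for_entity; infer_instance

-- ===== CLAIM (what is proved, stated in full; the proofs are below) =====
def Claim_equal_gap_spans_for_entity : Prop := ∀ (segments : List (List (String × Int))) (view_start : Int) (view_end : Int), Dom_gap_spans_for_entity segments view_start view_end → Pre_gap_spans_for_entity segments view_start view_end → Spec_gap_spans_for_entity segments view_start view_end (gap_spans_for_entity segments view_start view_end)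

-- ===== LEMMAS AND PROOFS =====

-- reference shape: the gap list from a cursor (B's sweep, written structurally)
def gapsFrom (segs : List (List (String × Int))) (cursor vend : Int) : List (Int × Int) :=
  match segs with
  | [] => if cursor ≤ vend then [(cursor, vend)] else []
  | seg :: rest =>
      (if segGet seg "start_frame" > cursor then [(cursor, segGet seg "start_frame" - 1)] else [])
        ++ gapsFrom rest (segGet seg "end_frame" + 1) vend

-- middle gaps of A, written as recursion on the tail with the previous end carried
def midGaps (segs : List (List (String × Int))) (prevE : Int) : List (Int × Int) :=
  match segs with
  | [] => []
  | seg :: rest =>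
      (if segGet seg "start_frame" > prevE + 1 then [(prevE + 1, segGet seg "start_frame" - 1)] else [])
        ++ midGaps rest (segGet seg "end_frame")

-- last end of a nonempty list, with default
def lastE (segs : List (List (String × Int))) (d : Int) : Int :=
  match segs with
  | [] => d
  | seg :: rest => lastE rest (segGet seg "end_frame")

lemma alt_eq_gapsFrom_aux (segs : List (List (String × Int))) :
    ∀ (g : List (Int × Int)) (c vend : Int),
      (let st := segs.foldl (fun (acc : List (Int × Int) × Int) seg =>
          let s := segGet seg "start_frame"
          let e := segGet seg "end_frame"
          ((if s > acc.2 then acc.1 ++ [(acc.2, s - 1)] else acc.1), e + 1)) (g, c)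
       if st.2 ≤ vend then st.1 ++ [(st.2, vend)] else st.1)
        = g ++ gapsFrom segs c vend := by
  induction segs with
  | nil =>
      intro g c vend
      simp only [List.foldl, gapsFrom]
      split <;> simp
  | cons seg rest ih =>
      intro g c vend
      simp only [List.foldl, gapsFrom]
      rw [ih]
      by_cases h : segGet seg "start_frame" > c <;> simp [h]

lemma alt_eq_gapsFrom (segments : List (List (String × Int))) (vs ve : Int) :
    gap_spans_for_entity_alt segments vs ve = gapsFrom segments vs ve := by
  have := alt_eq_gapsFrom_aux segments [] vs ve
  simpa [gap_spans_for_entity_alt] using this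

lemma mid_trail_eq_gapsFrom (segs : List (List (String × Int))) :
    ∀ (e0 vend : Int),
      midGaps segs e0 ++ (if lastE segs e0 < vend then [(lastE segs e0 + 1, vend)] else [])
        = gapsFrom segs (e0 + 1) vend := by
  induction segs with
  | nil =>
      intro e0 vend
      simp only [midGaps, lastE, gapsFrom, List.nil_append]
      by_cases h : e0 < vend
      · rw [if_pos h, if_pos (by omega)]
      · rw [if_neg h, if_neg (by omega)]
  | cons seg rest ih =>
      intro e0 vend
      simp only [midGaps, lastE, gapsFrom, List.append_assoc]
      rw [ih]

-- A's index loop over range(1, len) equals midGaps on the dropped tail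
lemma foldA_eq_midGaps (L : List (List (String × Int))) :
    ∀ (n : Nat) (k : Nat) (acc : List (Int × Int)),
      L.length - (k + 1) = n → k + 1 ≤ L.length →
      (PySem.List.pyRange ((k : Int) + 1) L.length 1).foldl (fun gaps i =>
          let prev_e := segGet (PySem.List.pyGetD L (i - 1) []) "end_frame"
          let cur_s := segGet (PySem.List.pyGetD L i []) "start_frame"
          if cur_s > prev_e + 1 then gaps ++ [(prev_e + 1, cur_s - 1)] else gaps) acc
        = acc ++ midGaps (L.drop (k + 1)) (segGet (L.getD k []) "end_frame") := by
  intro n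
  induction n with
  | zero =>
      intro k acc h0 h1
      have hk : k + 1 = L.length := by omega
      rw [PySem.List.pyRange_one_eq_nil (by omega)]
      have hd : L.drop (k + 1) = [] := List.drop_eq_nil_iff.mpr (by omega)
      rw [hd]
      simp [midGaps]
  | succ m ih =>
      intro k acc h0 h1
      have hk1 : k + 1 < L.length := by omega
      rw [PySem.List.pyRange_one_cons (by omega)]
      simp only [List.foldl_cons]
      have hget : ∀ (j : Nat), j < L.length → PySem.List.pyGetD L (j : Int) [] = L.getD j [] := by
        intro j hj
        rw [PySem.List.pyGetD_natCast]
      have e1 : PySem.List.pyGetD L ((k : Int) + 1 - 1) [] = L.getD k [] := by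
        have : (k : Int) + 1 - 1 = (k : Int) := by ring
        rw [this, hget k (by omega)]
      have e2 : PySem.List.pyGetD L ((k : Int) + 1) [] = L.getD (k + 1) [] := by
        have : (k : Int) + 1 = ((k + 1 : Nat) : Int) := by push_cast; ring
        rw [this, hget (k + 1) hk1]
      rw [show ((k : Int) + 1 + 1) = ((k + 1 : Nat) : Int) + 1 by push_cast; ring]
      rw [ih (k + 1) _ (by omega) (by omega)]
      have hdrop : L.drop (k + 1) = L.getD (k + 1) [] :: L.drop (k + 2) := by
        rw [List.getD_eq_getElem _ _ hk1]
        rw [List.drop_eq_getElem_cons hk1]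
      rw [hdrop]
      simp only [midGaps, e1, e2]
      by_cases h : segGet (L.getD (k + 1) []) "start_frame" > segGet (L.getD k []) "end_frame" + 1
      · simp only [List.getD] at h ⊢
        simp [h]
      · simp only [List.getD] at h ⊢
        simp [h]

lemma lastE_cons_eq (segs : List (List (String × Int))) :
    ∀ (seg : List (String × Int)) (d : Int),
      lastE (seg :: segs) d = segGet (((seg :: segs).getLast?).getD []) "end_frame" := by
  induction segs with
  | nil => intro seg d; simp [lastE]
  | cons a b ih =>
      intro seg d
      rw [show lastE (seg :: a :: b) d = lastE (a :: b) (segGet seg "end_frame") from rfl]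
      rw [ih a (segGet seg "end_frame"), List.getLast?_cons_cons]

-- every emitted gap satisfies end ≥ start, so A's final filter is the identity
lemma midGaps_sound (segs : List (List (String × Int))) :
    ∀ (e0 : Int) (g : Int × Int), g ∈ midGaps segs e0 → g.2 ≥ g.1 := by
  induction segs with
  | nil => intro e0 g hg; simp [midGaps] at hg
  | cons seg rest ih =>
      intro e0 g hg
      simp only [midGaps, List.mem_append] at hg
      rcases hg with hg | hg
      · by_cases h : segGet seg "start_frame" > e0 + 1
        · simp [h] at hg; subst hg; simp; omega
        · simp [h] at hg
      · exact ih _ _ hg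

lemma pyGetD_neg_one (L : List (List (String × Int))) (h : L ≠ []) :
    PySem.List.pyGetD L (-1) [] = (L.getLast?).getD [] := by
  have hlen : 0 < L.length := List.length_pos_iff.mpr h
  simp only [PySem.List.pyGetD, PySem.List.pyGet?, PySem.List.pyIdx?]
  rw [if_neg (by omega : ¬ (0 ≤ (-1 : Int))), if_pos (by omega : -(L.length : Int) ≤ -1)]
  rw [List.getLast?_eq_getElem?]
  have : (-(-1 : Int)).toNat = 1 := by decide
  rw [this]
  simp

-- ===== VERDICT (by name: the statement is the Claim_ definition above) =====
theorem gap_spans_for_entity_spec : Claim_equal_gap_spans_for_entity := by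
  intro segments vs ve _ _
  unfold Spec_gap_spans_for_entity
  rw [alt_eq_gapsFrom]
  cases segments with
  | nil =>
      by_cases h : vs ≤ ve
      · simp [gap_spans_for_entity, gapsFrom, h, ge_iff_le]
      · simp [gap_spans_for_entity, gapsFrom, h, ge_iff_le]
  | cons seg0 rest =>
      have hne : (seg0 :: rest : List (List (String × Int))) ≠ [] := by simp
      simp only [gap_spans_for_entity, if_neg hne]
      set L := seg0 :: rest with hL
      have h0 : PySem.List.pyGetD L 0 [] = seg0 := by
        simp [PySem.List.pyGetD, PySem.List.pyGet?, PySem.List.pyIdx?, hL]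
      have hfold := foldA_eq_midGaps L (L.length - 1) 0
        (if segGet seg0 "start_frame" > vs then [(vs, segGet seg0 "start_frame" - 1)] else [])
        (by omega) (by simp [hL])
      rw [show ((0 : Nat) : Int) + 1 = 1 by norm_num] at hfold
      have hdrop1 : L.drop 1 = rest := by simp [hL]
      have hget0 : L.getD 0 [] = seg0 := by simp [hL]
      rw [hdrop1, hget0] at hfold
      simp only [h0, hfold]
      rw [pyGetD_neg_one L hne]
      have hlast : lastE rest (segGet seg0 "end_frame") = segGet ((L.getLast?).getD []) "end_frame" := by
        rw [show lastE rest (segGet seg0 "end_frame") = lastE (seg0 :: rest) 0 from rfl]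
        exact lastE_cons_eq rest seg0 0
      rw [← hlast]
      have key := mid_trail_eq_gapsFrom rest (segGet seg0 "end_frame") ve
      -- assemble: leading ++ (mid ++ trailing) then filter
      set lead := (if segGet seg0 "start_frame" > vs then [(vs, segGet seg0 "start_frame" - 1)] else []) with hlead
      set mids := midGaps rest (segGet seg0 "end_frame") with hmids
      set le' := lastE rest (segGet seg0 "end_frame") with hle
      have hassm :
          (if le' < ve then (lead ++ mids) ++ [(le' + 1, ve)] else lead ++ mids)
            = lead ++ (mids ++ (if le' < ve then [(le' + 1, ve)] else [])) := by
        by_cases h : le' < ve <;> simp [h]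
      rw [hassm, hmids, hle, key]
      -- the filter keeps everything
      have hall : ∀ g ∈ lead ++ gapsFrom rest (segGet seg0 "end_frame" + 1) ve,
          decide (g.2 ≥ g.1) = true := by
        intro g hg
        simp only [decide_eq_true_eq]
        rcases List.mem_append.mp hg with hg | hg
        · rw [hlead] at hg
          by_cases h : segGet seg0 "start_frame" > vs
          · simp [h] at hg; subst hg; simp; omega
          · simp [h] at hg
        · rw [← mid_trail_eq_gapsFrom] at hg
          rcases List.mem_append.mp hg with hg | hg
          · have := midGaps_sound rest (segGet seg0 "end_frame") g hg
            simpa using this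
          · by_cases h : lastE rest (segGet seg0 "end_frame") < ve
            · simp [h] at hg; subst hg; simp; omega
            · simp [h] at hg
      rw [List.filter_eq_self.mpr hall]
      rw [hL]
      simp [gapsFrom]
      exact hlead
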